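-- pv_equiv track=rewrite | github.com/joniumGit/dnsmule | plugins/src/dnsmule_plugins/certcheck/domains.py | spread_domain
-- ===== SOURCE A (Python) =====
-- from typing import Iterable, TypeVar, Hashable
--
-- def spread_domain(domain: str) -> Iterable[str]:
--     """Spreads a domain into all valid super domains
--     """
--     parts = domain.strip().split('.')
--     if parts[0] == '*' or parts[0] == '':
--         parts = parts[1:]
--     if len(parts) > 2:
--         partial_domain = '.'.join(parts[-2:])
--         yield partial_domain
--         for i in range(-3, -len(parts) - 1, -1):
--             partial_domain = f'{parts[i]}.{partial_domain}'
--             yield partial_domain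
--     elif len(parts) == 2:
--         yield '.'.join(parts)
-- ===== SOURCE B (Python) =====
-- def spread_domain(domain):
--     parts = domain.strip().split('.')
--     if parts[0] == '*' or parts[0] == '':
--         parts = parts[1:]
--     for i in range(2, len(parts) + 1):
--         yield '.'.join(parts[-i:])
-- ===== Notes on version B (the rewrite author's own statement) =====
-- stated objective: simpler
-- what changed: Replaces A's two-branch structure (special-case for len==2 plus a loop that maintains and prepends to an accumulator string) with a single loop over suffix lengths i=2..len(parts) that slices the last i labels and joins them fresh.
import Mathlib
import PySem

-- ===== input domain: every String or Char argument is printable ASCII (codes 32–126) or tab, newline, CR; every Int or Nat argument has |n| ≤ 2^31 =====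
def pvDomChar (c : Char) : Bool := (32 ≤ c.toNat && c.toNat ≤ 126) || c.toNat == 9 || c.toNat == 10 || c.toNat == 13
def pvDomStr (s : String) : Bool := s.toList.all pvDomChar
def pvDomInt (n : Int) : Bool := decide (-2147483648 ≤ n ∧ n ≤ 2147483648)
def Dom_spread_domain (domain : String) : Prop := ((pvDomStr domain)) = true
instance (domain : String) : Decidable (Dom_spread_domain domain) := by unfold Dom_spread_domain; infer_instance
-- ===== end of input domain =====

-- B replaces A's two-branch accumulator loop by a single slice-and-join loop over suffix lengths (objective: simpler).

-- ===== PORT A =====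
def spread_domain (domain : String) : List String :=
  let parts0 := (PySem.Str.split? (PySem.Str.strip domain) ".").getD []
  let parts := if PySem.List.pyGetD parts0 0 "" = "*" ∨ PySem.List.pyGetD parts0 0 "" = ""
    then PySem.List.slice parts0 (some 1) none else parts0
  if 2 < parts.length then
    let pd := PySem.Str.join "." (PySem.List.slice parts (some (-2)) none)
    let res := (PySem.List.pyRange (-3) (-(parts.length : Int) - 1) (-1)).foldl
      (fun (st : String × List String) i =>
        let pd' := PySem.List.pyGetD parts i "" ++ "." ++ st.1
        (pd', st.2 ++ [pd']))
      (pd, [pd])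
    res.2
  else if parts.length = 2 then [PySem.Str.join "." parts] else []

-- ===== PORT B =====
def spread_domain_alt (domain : String) : List String :=
  let parts0 := (PySem.Str.split? (PySem.Str.strip domain) ".").getD []
  let parts := if PySem.List.pyGetD parts0 0 "" = "*" ∨ PySem.List.pyGetD parts0 0 "" = ""
    then PySem.List.slice parts0 (some 1) none else parts0
  (PySem.List.pyRange 2 ((parts.length : Int) + 1)).map
    (fun i => PySem.Str.join "." (PySem.List.slice parts (some (-i)) none))

-- ===== PRECONDITION & SPEC =====
def Spec_spread_domain (domain : String) (out : List String) : Prop := out = spread_domain_alt domain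
instance (domain : String) (out : List String) : Decidable (Spec_spread_domain domain out) := by unfold Spec_spread_domain; infer_instance

-- ===== CLAIM (what is proved, stated in full; the proofs are below) =====
def Claim_equal_spread_domain : Prop := ∀ (domain : String), Dom_spread_domain domain → Spec_spread_domain domain (spread_domain domain)

-- ===== LEMMAS AND PROOFS =====

-- join of the suffix of ps starting at position j
def pvJ (ps : List String) (j : Nat) : String := PySem.Str.join "." (List.drop j ps)

theorem pv_join_cons_cons (p q : String) (rest : List String) :
    PySem.Str.join "." (p :: q :: rest) = p ++ "." ++ PySem.Str.join "." (q :: rest) := by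
  apply String.ext
  simp [PySem.Str.toList_join, String.toList_append, PySem.Chars.join_cons_cons]

theorem pvJ_step (ps : List String) (j : Nat) (h : j + 1 < ps.length) :
    pvJ ps j = ps.getD j "" ++ "." ++ pvJ ps (j + 1) := by
  unfold pvJ
  rw [List.drop_eq_getElem_cons (by omega : j < ps.length)]
  have hlen : 0 < (ps.drop (j+1)).length := by simp; omega
  cases hd : ps.drop (j+1) with
  | nil => rw [hd] at hlen; simp at hlen
  | cons y rest =>
    rw [pv_join_cons_cons]
    simp [List.getD_eq_getElem?_getD, List.getElem?_eq_getElem (show j < ps.length by omega)]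

theorem pv_pyGetD_neg (ps : List String) (i : Int) (d : String)
    (h1 : -(ps.length : Int) ≤ i) (h2 : i < 0) :
    PySem.List.pyGetD ps i d = ps.getD (ps.length - (-i).toNat) d := by
  simp only [PySem.List.pyGetD, PySem.List.pyGet?, PySem.List.pyIdx?,
    if_neg (by omega : ¬ (0 : Int) ≤ i), if_pos h1, Option.bind_some,
    List.getD_eq_getElem?_getD]

-- the emitted loop items of A, generalized over the number m+1 of remaining iterations
theorem pv_loopA (ps : List String) : ∀ (m : Nat) (acc : List String),
    m + 3 ≤ ps.length →
    (PySem.List.pyRange ((m : Int) - ps.length) (-(ps.length : Int) - 1) (-1)).foldl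
      (fun (st : String × List String) i =>
        let pd' := PySem.List.pyGetD ps i "" ++ "." ++ st.1
        (pd', st.2 ++ [pd']))
      (pvJ ps (m + 1), acc)
    = (pvJ ps 0, acc ++ (List.range (m + 1)).reverse.map (fun t => pvJ ps t)) := by
  intro m
  induction m with
  | zero =>
    intro acc h
    simp only [Nat.cast_zero, zero_sub]
    rw [PySem.List.pyRange_neg_one_cons (by omega), PySem.List.pyRange_neg_one_eq_nil (by omega)]
    simp only [List.foldl_cons, List.foldl_nil]
    rw [pv_pyGetD_neg ps _ _ (by omega) (by omega)]
    have : (-(-(ps.length : Int))).toNat = ps.length := by omega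
    rw [this, Nat.sub_self]
    rw [← pvJ_step ps 0 (by omega)]
    simp
  | succ m ih =>
    intro acc h
    rw [PySem.List.pyRange_neg_one_cons (by omega)]
    simp only [List.foldl_cons]
    rw [pv_pyGetD_neg ps _ _ (by omega) (by omega)]
    have h1 : (-((↑(m + 1) : Int) - ↑ps.length)).toNat = ps.length - (m + 1) := by omega
    have h2 : ps.length - (ps.length - (m + 1)) = m + 1 := by omega
    rw [h1, h2, ← pvJ_step ps (m + 1) (by omega)]
    have h3 : ((↑(m + 1) : Int) - ↑ps.length) - 1 = (m : Int) - ps.length := by push_cast; ring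
    rw [h3, ih (acc ++ [pvJ ps (m + 1)]) (by omega)]
    simp [List.range_succ]

-- the index list of B, as a reversed range
theorem pv_idx_list : ∀ (k : Nat) (a : Int) (n : Nat), 0 ≤ a → a.toNat + k = n + 1 →
    (PySem.List.pyRange a ((n : Int) + 1)).map (fun i : Int => n - i.toNat)
      = (List.range k).reverse := by
  intro k
  induction k with
  | zero =>
    intro a n h0 h
    rw [PySem.List.pyRange_one_eq_nil (by omega)]
    simp
  | succ k ih =>
    intro a n h0 h
    rw [PySem.List.pyRange_one_cons (by omega : a < (n : Int) + 1)]
    simp only [List.map_cons]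
    rw [ih (a + 1) n (by omega) (by omega)]
    have h2 : n - a.toNat = k := by omega
    rw [h2, List.range_succ]
    simp

theorem pv_slice_neg (ps : List String) (i : Int) (h1 : 0 < i) :
    PySem.List.slice ps (some (-i)) none = ps.drop (ps.length - i.toNat) := by
  rw [show -i = -((i.toNat : Nat) : Int) by omega,
    PySem.List.slice_from_neg_natCast ps i.toNat (by omega)]

-- both ports, reduced to a statement about the shared parts list
theorem pv_core (ps : List String) :
    (if 2 < ps.length then
      (let pd := PySem.Str.join "." (PySem.List.slice ps (some (-2)) none)
       let res := (PySem.List.pyRange (-3) (-(ps.length : Int) - 1) (-1)).foldl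
        (fun (st : String × List String) i =>
          let pd' := PySem.List.pyGetD ps i "" ++ "." ++ st.1
          (pd', st.2 ++ [pd']))
        (pd, [pd])
       res.2)
    else if ps.length = 2 then [PySem.Str.join "." ps] else [])
    = (PySem.List.pyRange 2 ((ps.length : Int) + 1)).map
        (fun i => PySem.Str.join "." (PySem.List.slice ps (some (-i)) none)) := by
  have hB : (PySem.List.pyRange 2 ((ps.length : Int) + 1)).map
      (fun i => PySem.Str.join "." (PySem.List.slice ps (some (-i)) none))
      = ((PySem.List.pyRange 2 ((ps.length : Int) + 1)).map
          (fun i : Int => ps.length - i.toNat)).map (fun t => pvJ ps t) := by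
    rw [List.map_map]
    apply List.map_congr_left
    intro i hi
    rw [PySem.List.mem_pyRange_one] at hi
    simp only [Function.comp_apply]
    rw [pv_slice_neg ps i (by omega)]
    rfl
  by_cases h2 : 2 < ps.length
  · rw [if_pos h2, hB]
    have hpd : PySem.Str.join "." (PySem.List.slice ps (some (-2)) none)
        = pvJ ps (ps.length - 2) := by
      rw [pv_slice_neg ps 2 (by omega)]; rfl
    simp only [hpd]
    have hstart : (-3 : Int) = ((ps.length - 3 : Nat) : Int) - ps.length := by omega
    have hJ : pvJ ps (ps.length - 2) = pvJ ps ((ps.length - 3) + 1) := by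
      congr 1; omega
    rw [hstart, hJ, pv_loopA ps (ps.length - 3) [pvJ ps ((ps.length - 3) + 1)] (by omega)]
    rw [pv_idx_list (ps.length - 1) 2 ps.length (by norm_num) (by omega)]
    have hnn : ps.length - 3 + 1 = ps.length - 2 := by omega
    have hr : ps.length - 1 = (ps.length - 2) + 1 := by omega
    rw [hnn, hr, List.range_succ]
    simp
  · rw [if_neg h2, hB]
    by_cases he : ps.length = 2
    · rw [if_pos he]
      rw [pv_idx_list 1 2 ps.length (by norm_num) (by omega)]
      simp [pvJ]
    · rw [if_neg he, PySem.List.pyRange_one_eq_nil (by omega)]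
      simp

-- ===== VERDICT (by name: the statement is the Claim_ definition above) =====
theorem spread_domain_spec : Claim_equal_spread_domain := by
  intro domain _
  unfold Spec_spread_domain spread_domain spread_domain_alt
  exact pv_core _
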